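-- pv_equiv track=rewrite | github.com/alp-oz/kcore-chain | diamond.py | core_to_bounded
-- ===== SOURCE A (Python) =====
-- def _normalize(p: tuple[int, ...]) -> tuple[int, ...]:
--     return tuple(sorted((x for x in p if x > 0), reverse=True))
--
-- def core_to_bounded(kappa: tuple[int, ...], k: int) -> tuple[int, ...]:
--     """
--     Map a (k+1)-core to its k-bounded partition.
--     Row i of the result has length = #{cells in row i of kappa with hook <= k}.
--     """
--     if not kappa:
--         return ()
--     n = len(kappa)
--     rows = []
--     for i in range(n):
--         cnt = sum(
--             1 for j in range(kappa[i])
--             if (kappa[i] - j - 1) + sum(1 for r in range(i+1, n) if kappa[r] > j) + 1 <= k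
--         )
--         if cnt > 0:
--             rows.append(cnt)
--     return _normalize(tuple(rows))
-- ===== SOURCE B (Python) =====
-- import bisect
--
-- def core_to_bounded(kappa: tuple[int, ...], k: int) -> tuple[int, ...]:
--     # Sorted multiset of the rows strictly below the current one; per row,
--     # the hook length is strictly decreasing along the row, so the cells with
--     # hook <= k form a suffix found by binary search; leg counts come from
--     # bisect on the sorted multiset instead of a scan over the rows below.
--     below = sorted(kappa)
--     rows = []
--     for x in kappa:
--         del below[bisect.bisect_left(below, x)]   # drop this row from the multiset
--         if x > 0:
--             m = len(below)
--             lo, hi = 0, x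
--             while lo < hi:                         # least j with hook(j) <= k
--                 mid = (lo + hi) // 2
--                 if x - mid + (m - bisect.bisect_right(below, mid)) <= k:
--                     hi = mid
--                 else:
--                     lo = mid + 1
--             cnt = x - lo
--             if cnt > 0:
--                 rows.append(cnt)
--     return tuple(sorted(rows, reverse=True))
-- ===== Notes on version B (the rewrite author's own statement) =====
-- stated objective: faster
-- what changed: Per row, A scans every cell and for each cell rescans all lower rows to get the leg count; B keeps one sorted multiset of the rows below (bisect_left deletion, bisect_right leg counts) and, since the hook length is strictly decreasing along a row, binary-searches the first cell with hook <= k instead of scanning the row.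
import Mathlib
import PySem

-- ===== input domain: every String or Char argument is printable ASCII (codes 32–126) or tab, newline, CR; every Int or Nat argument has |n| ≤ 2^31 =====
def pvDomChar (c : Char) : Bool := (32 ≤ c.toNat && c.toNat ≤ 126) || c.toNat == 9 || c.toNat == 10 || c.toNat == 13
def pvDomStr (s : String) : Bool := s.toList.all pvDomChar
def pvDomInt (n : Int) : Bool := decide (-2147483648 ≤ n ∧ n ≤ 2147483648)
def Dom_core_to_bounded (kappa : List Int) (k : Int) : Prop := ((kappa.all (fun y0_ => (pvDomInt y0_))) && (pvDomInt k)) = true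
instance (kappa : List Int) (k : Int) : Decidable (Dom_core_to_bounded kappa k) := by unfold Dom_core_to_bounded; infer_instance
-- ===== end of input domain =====

-- B replaces A's per-cell scan of all lower rows by a sorted multiset of the rows below
-- (bisect for leg counts) plus a binary search along each row for the first cell with
-- hook <= k; objective: faster.

-- ===== PORT A =====
-- _normalize
def pyNormalize (p : List Int) : List Int :=
  PySem.List.sorted (p.filter (fun x => decide (x > 0))) (fun x => x) true

def core_to_bounded (kappa : List Int) (k : Int) : List Int :=
  if kappa = [] then []
  else
    let n : Int := PySem.List.len kappa
    let rows : List Int :=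
      (PySem.List.pyRange 0 n).foldl (fun rows i =>
        let cnt : Int :=
          (PySem.List.pyRange 0 (PySem.List.pyGetD kappa i 0)).foldl
            (fun c j =>
              if (PySem.List.pyGetD kappa i 0 - j - 1)
                  + ((PySem.List.pyRange (i + 1) n).foldl
                      (fun s r => if PySem.List.pyGetD kappa r 0 > j then s + 1 else s) 0)
                  + 1 ≤ k then c + 1 else c) 0
        if cnt > 0 then rows ++ [cnt] else rows) []
    pyNormalize rows

-- ===== PORT B =====
-- the `while lo < hi` binary search for the least j with hook(j) <= k
def hookSearch (below : List Int) (k x m lo hi : Int) : Int :=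
  if h : lo < hi then
    let mid := PySem.Int.floordiv (lo + hi) 2
    if x - mid + (m - (PySem.List.bisectRight below mid : Int)) ≤ k then
      hookSearch below k x m lo mid
    else
      hookSearch below k x m (mid + 1) hi
  else lo
termination_by (hi - lo).toNat
decreasing_by
  all_goals
    have h1 := PySem.Int.floordiv_mul_add_mod (lo + hi) 2
    have h2 := PySem.Int.mod_nonneg (lo + hi) (b := 2) (by norm_num)
    have h3 := PySem.Int.mod_lt (lo + hi) (b := 2) (by norm_num)
    omega

def core_to_bounded_alt (kappa : List Int) (k : Int) : List Int :=
  let st := kappa.foldl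
    (fun (st : List Int × List Int) x =>
      -- del below[bisect_left(below, x)]  (the index is always in range: x is in the multiset)
      let below := st.1.eraseIdx (PySem.List.bisectLeft st.1 x)
      if x > 0 then
        let m : Int := PySem.List.len below
        let lo := hookSearch below k x m 0 x
        let cnt := x - lo
        if cnt > 0 then (below, st.2 ++ [cnt]) else (below, st.2)
      else (below, st.2))
    (PySem.List.sorted kappa (fun x => x) false, ([] : List Int))
  PySem.List.sorted st.2 (fun x => x) true

-- ===== PRECONDITION & SPEC =====
def Spec_core_to_bounded (kappa : List Int) (k : Int) (out : List Int) : Prop := out = core_to_bounded_alt kappa k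
instance (kappa : List Int) (k : Int) (out : List Int) : Decidable (Spec_core_to_bounded kappa k out) := by unfold Spec_core_to_bounded; infer_instance

-- ===== CLAIM (what is proved, stated in full; the proofs are below) =====
def Claim_equal_core_to_bounded : Prop := ∀ (kappa : List Int) (k : Int), Dom_core_to_bounded kappa k → Spec_core_to_bounded kappa k (core_to_bounded kappa k)

-- ===== LEMMAS AND PROOFS =====

-- number of elements of a sorted list strictly greater than j, via bisect_right
lemma count_gt_of_sorted (l : List Int) (hs : l.Pairwise (· ≤ ·)) (j : Int) :
    (l.length : Int) - (PySem.List.bisectRight l j : Int)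
      = (l.countP (fun y => decide (y > j)) : Int) := by
  obtain ⟨hble, hlo, hhi⟩ := PySem.List.bisectRight_spec l j hs
  set b := PySem.List.bisectRight l j with hb
  have hsplit : l = l.take b ++ l.drop b := (List.take_append_drop b l).symm
  have h1 : (l.take b).countP (fun y => decide (y > j)) = 0 := by
    rw [List.countP_eq_zero]
    intro a ha
    obtain ⟨i, hi, rfl⟩ := List.getElem_of_mem ha
    have hi' : i < l.length := lt_of_lt_of_le (lt_of_lt_of_le hi (by simp)) (le_refl _)
    rw [List.getElem_take]
    have : i < b := lt_of_lt_of_le hi (by simp [List.length_take])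
    have := hlo i (by omega) this
    simp only [decide_eq_true_eq, gt_iff_lt]
    omega
  have h2 : (l.drop b).countP (fun y => decide (y > j)) = (l.drop b).length := by
    rw [List.countP_eq_length]
    intro a ha
    obtain ⟨i, hi, rfl⟩ := List.getElem_of_mem ha
    rw [List.getElem_drop]
    have hlt : b + i < l.length := by simp [List.length_drop] at hi; omega
    have := hhi (b + i) hlt (by omega)
    simp only [decide_eq_true_eq, gt_iff_lt]
    omega
  have := congrArg (List.countP (fun y => decide (y > j))) hsplit
  rw [List.countP_append, h1, h2] at this
  rw [this]
  simp [List.length_drop]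
  omega

-- bisect_right is monotone in the query on a sorted list
lemma bisectRight_mono (l : List Int) (hs : l.Pairwise (· ≤ ·)) {j j' : Int} (h : j ≤ j') :
    PySem.List.bisectRight l j ≤ PySem.List.bisectRight l j' := by
  obtain ⟨hble, hlo, hhi⟩ := PySem.List.bisectRight_spec l j hs
  obtain ⟨hble', hlo', hhi'⟩ := PySem.List.bisectRight_spec l j' hs
  rcases Nat.lt_or_ge (PySem.List.bisectRight l j') (PySem.List.bisectRight l j) with hc | hc
  · have hblen : PySem.List.bisectRight l j' < l.length := lt_of_lt_of_le hc hble
    have h1 := hlo _ hblen hc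
    have h2 := hhi' _ hblen (le_refl _)
    omega
  · exact hc

-- deleting at bisect_left removes one occurrence of x and keeps the list sorted
lemma eraseIdx_bisectLeft (l : List Int) (hs : l.Pairwise (· ≤ ·)) (x : Int) (hx : x ∈ l) :
    (l.eraseIdx (PySem.List.bisectLeft l x)).Pairwise (· ≤ ·) ∧
    l.Perm (x :: l.eraseIdx (PySem.List.bisectLeft l x)) := by
  obtain ⟨i, hi, hix⟩ := List.getElem_of_mem hx
  obtain ⟨hble, hlo, hhi⟩ := PySem.List.bisectLeft_spec l x hs
  set b := PySem.List.bisectLeft l x with hb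
  have hbi : b ≤ i := by
    rcases Nat.lt_or_ge i b with hc | hc
    · have := hlo i hi hc; omega
    · exact hc
  have hblen : b < l.length := lt_of_le_of_lt hbi hi
  have hbx : l[b] = x := by
    have h1 := hhi b hblen (le_refl _)
    rcases eq_or_lt_of_le hbi with heq | hlt
    · simpa only [heq] using hix
    · have h2 := (List.pairwise_iff_getElem.mp hs) b i hblen hi hlt
      rw [hix] at h2; omega
  constructor
  · exact List.Pairwise.sublist (List.eraseIdx_sublist l b) hs
  · have := List.getElem_cons_eraseIdx_perm hblen
    rw [hbx] at this
    exact this.symm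

-- counting an upward-closed predicate over range(0, x) whose boundary is r
lemma countP_pyRange_of_mono (Q : Int → Bool) (x r : Int) (h0 : 0 ≤ r) (hrx : r ≤ x)
    (hlt : ∀ j, 0 ≤ j → j < r → Q j = false) (hge : ∀ j, r ≤ j → j < x → Q j = true) :
    (((PySem.List.pyRange 0 x).countP Q : Int)) = x - r := by
  rw [PySem.List.pyRange_one_append 0 r x h0 hrx, List.countP_append]
  have h1 : (PySem.List.pyRange 0 r).countP Q = 0 := by
    rw [List.countP_eq_zero]
    intro a ha
    rw [PySem.List.mem_pyRange_one] at ha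
    simp [hlt a ha.1 ha.2]
  have h2 : (PySem.List.pyRange r x).countP Q = (PySem.List.pyRange r x).length := by
    rw [List.countP_eq_length]
    intro a ha
    rw [PySem.List.mem_pyRange_one] at ha
    exact hge a ha.1 ha.2
  rw [h1, h2, PySem.List.length_pyRange_one]
  omega

-- the hook predicate is upward closed in j
lemma hook_mono (l : List Int) (hs : l.Pairwise (· ≤ ·)) (k x m : Int) {j j' : Int}
    (h : j ≤ j') (hj : x - j + (m - (PySem.List.bisectRight l j : Int)) ≤ k) :
    x - j' + (m - (PySem.List.bisectRight l j' : Int)) ≤ k := by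
  have h1 := bisectRight_mono l hs h
  have h2 := (PySem.List.bisectRight_spec l j hs).1
  have h3 := (PySem.List.bisectRight_spec l j' hs).1
  omega

-- binary-search correctness for hookSearch
lemma hookSearch_spec (below : List Int) (hs : below.Pairwise (· ≤ ·)) (k x m : Int) :
    ∀ (lo hi : Int), lo ≤ hi →
      lo ≤ hookSearch below k x m lo hi ∧ hookSearch below k x m lo hi ≤ hi ∧
      (∀ j, lo ≤ j → j < hookSearch below k x m lo hi →
        ¬ (x - j + (m - (PySem.List.bisectRight below j : Int)) ≤ k)) ∧
      (hookSearch below k x m lo hi < hi →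
        x - hookSearch below k x m lo hi
          + (m - (PySem.List.bisectRight below (hookSearch below k x m lo hi) : Int)) ≤ k) := by
  intro lo hi
  induction lo, hi using hookSearch.induct below k x m with
  | case1 lo hi h mid hq ih =>
    intro _
    have hmid := PySem.Int.floordiv_two_mid_bounds (le_of_lt h)
    rw [show PySem.Int.floordiv (lo + hi) 2 = mid from rfl] at hmid
    have hmlt : mid < hi := by
      have h1 := PySem.Int.floordiv_mul_add_mod (lo + hi) 2
      have h2 := PySem.Int.mod_nonneg (lo + hi) (b := 2) (by norm_num)
      have h3 := PySem.Int.mod_lt (lo + hi) (b := 2) (by norm_num)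
      have h4 : PySem.Int.floordiv (lo + hi) 2 = mid := rfl
      omega
    obtain ⟨i1, i2, i3, i4⟩ := ih hmid.1
    rw [hookSearch, dif_pos h, if_pos hq]
    rw [show PySem.Int.floordiv (lo + hi) 2 = mid from rfl]
    refine ⟨i1, le_trans i2 (le_of_lt hmlt), i3, ?_⟩
    intro _
    rcases lt_or_eq_of_le i2 with hlt | heq
    · exact i4 hlt
    · rw [heq]; exact hq
  | case2 lo hi h mid hq ih =>
    intro _
    have hmid := PySem.Int.floordiv_two_mid_bounds (le_of_lt h)
    rw [show PySem.Int.floordiv (lo + hi) 2 = mid from rfl] at hmid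
    have hmlt : mid < hi := by
      have h1 := PySem.Int.floordiv_mul_add_mod (lo + hi) 2
      have h2 := PySem.Int.mod_nonneg (lo + hi) (b := 2) (by norm_num)
      have h3 := PySem.Int.mod_lt (lo + hi) (b := 2) (by norm_num)
      have h4 : PySem.Int.floordiv (lo + hi) 2 = mid := rfl
      omega
    obtain ⟨i1, i2, i3, i4⟩ := ih (by omega)
    rw [hookSearch, dif_pos h, if_neg hq]
    rw [show PySem.Int.floordiv (lo + hi) 2 = mid from rfl]
    refine ⟨by omega, i2, ?_, i4⟩
    intro j hj1 hj2 hcon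
    by_cases hle : j ≤ mid
    · exact hq (hook_mono below hs k x m hle hcon)
    · exact i3 j (by omega) hj2 hcon
  | case3 lo hi h =>
    intro hle
    rw [hookSearch, dif_neg h]
    exact ⟨le_refl _, hle, fun j h1 h2 => by omega, fun hc => absurd (lt_of_le_of_lt (le_refl lo) hc) h⟩

-- the two loops agree step for step (and all collected row lengths are positive)
set_option maxHeartbeats 2000000 in
lemma main_loop (kappa : List Int) (k : Int) :
    ∀ (rest : List Int) (i : Nat) (acc below : List Int),
      kappa.drop i = rest →
      below.Pairwise (· ≤ ·) → below.Perm rest → (∀ c ∈ acc, 0 < c) →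
      ((PySem.List.pyRange (i : Int) ((kappa.length : Nat) : Int)).foldl (fun rows i =>
        let cnt : Int :=
          (PySem.List.pyRange 0 (PySem.List.pyGetD kappa i 0)).foldl
            (fun c j =>
              if (PySem.List.pyGetD kappa i 0 - j - 1)
                  + ((PySem.List.pyRange (i + 1) ((kappa.length : Nat) : Int)).foldl
                      (fun s r => if PySem.List.pyGetD kappa r 0 > j then s + 1 else s) 0)
                  + 1 ≤ k then c + 1 else c) 0
        if cnt > 0 then rows ++ [cnt] else rows) acc
        = (rest.foldl (fun (st : List Int × List Int) x =>
            let below := st.1.eraseIdx (PySem.List.bisectLeft st.1 x)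
            if x > 0 then
              let m : Int := PySem.List.len below
              let lo := hookSearch below k x m 0 x
              let cnt := x - lo
              if cnt > 0 then (below, st.2 ++ [cnt]) else (below, st.2)
            else (below, st.2)) (below, acc)).2)
      ∧ (∀ c ∈ (rest.foldl (fun (st : List Int × List Int) x =>
            let below := st.1.eraseIdx (PySem.List.bisectLeft st.1 x)
            if x > 0 then
              let m : Int := PySem.List.len below
              let lo := hookSearch below k x m 0 x
              let cnt := x - lo
              if cnt > 0 then (below, st.2 ++ [cnt]) else (below, st.2)
            else (below, st.2)) (below, acc)).2, 0 < c) := by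
  intro rest
  induction rest with
  | nil =>
    intro i acc below hdrop hsort hperm hpos
    have hlen : kappa.length ≤ i := by
      have := congrArg List.length hdrop
      simp only [List.length_drop, List.length_nil] at this
      omega
    rw [PySem.List.pyRange_one_eq_nil (by exact_mod_cast hlen)]
    exact ⟨rfl, hpos⟩
  | cons x rest' ih =>
    intro i acc below hdrop hsort hperm hpos
    have hlen : i < kappa.length := by
      have := congrArg List.length hdrop
      simp only [List.length_drop, List.length_cons] at this
      omega
    have hx : kappa[i] = x := by
      have h0 : (kappa.drop i)[0]'(by rw [hdrop]; simp) = x := by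
        simp [hdrop]
      rw [List.getElem_drop] at h0
      simpa using h0
    have hdrop' : kappa.drop (i + 1) = rest' := by
      have := congrArg List.tail hdrop
      simpa [List.tail_drop] using this
    have hxb : x ∈ below := hperm.mem_iff.mpr (by simp)
    obtain ⟨hsort', hpermcons⟩ := eraseIdx_bisectLeft below hsort x hxb
    have hperm' : (below.eraseIdx (PySem.List.bisectLeft below x)).Perm rest' :=
      List.Perm.cons_inv (hpermcons.symm.trans hperm)
    have hget : PySem.List.pyGetD kappa (i : Int) 0 = x := by
      rw [PySem.List.pyGetD_eq_getElem kappa 0 (by omega) (by exact_mod_cast hlen)]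
      simpa using hx
    rw [PySem.List.pyRange_one_cons (by exact_mod_cast hlen)]
    simp only [List.foldl_cons]
    rw [hget]
    have hcast : (i : Int) + 1 = ((i + 1 : Nat) : Int) := by push_cast; ring
    by_cases hxpos : x > 0
    · -- positive row
      have hleg : ∀ j : Int,
          (PySem.List.pyRange ((i : Int) + 1) ((kappa.length : Nat) : Int)).foldl
            (fun s r => if PySem.List.pyGetD kappa r 0 > j then s + 1 else s) 0
            = (rest'.countP (fun y => decide (y > j)) : Int) := by
        intro j
        rw [PySem.List.foldl_pyRange_pyGetD' kappa 0
              (fun s y => if y > j then s + 1 else s) (0 : Int) (a := (i : Int) + 1) (by omega)]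
        rw [show ((i : Int) + 1).toNat = i + 1 by omega, hdrop']
        have h2 := PySem.List.foldl_count_if (fun y => decide (y > j)) rest' 0
        simp only [decide_eq_true_eq] at h2
        rw [h2, zero_add]
      have hlenb' : PySem.List.len (below.eraseIdx (PySem.List.bisectLeft below x))
          = ((below.eraseIdx (PySem.List.bisectLeft below x)).length : Int) := by
        simp [PySem.List.len]
      obtain ⟨i1, i2, i3, i4⟩ := hookSearch_spec
        (below.eraseIdx (PySem.List.bisectLeft below x)) hsort' k x
        (PySem.List.len (below.eraseIdx (PySem.List.bisectLeft below x))) 0 x (by omega)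
      have hQiff : ∀ j : Int,
          ((x - j - 1) + (rest'.countP (fun y => decide (y > j)) : Int) + 1 ≤ k)
          ↔ (x - j + (PySem.List.len (below.eraseIdx (PySem.List.bisectLeft below x))
              - (PySem.List.bisectRight (below.eraseIdx (PySem.List.bisectLeft below x)) j : Int)) ≤ k) := by
        intro j
        have hc := count_gt_of_sorted (below.eraseIdx (PySem.List.bisectLeft below x)) hsort' j
        have hcp := List.Perm.countP_eq (fun y => decide (y > j)) hperm'
        rw [hlenb']
        omega
      have hcnt : (PySem.List.pyRange 0 x).foldl
          (fun c j => if (x - j - 1)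
              + ((PySem.List.pyRange ((i : Int) + 1) ((kappa.length : Nat) : Int)).foldl
                  (fun s r => if PySem.List.pyGetD kappa r 0 > j then s + 1 else s) 0)
              + 1 ≤ k then c + 1 else c) 0
          = x - hookSearch (below.eraseIdx (PySem.List.bisectLeft below x)) k x
              (PySem.List.len (below.eraseIdx (PySem.List.bisectLeft below x))) 0 x := by
        have hfun : (fun (c j : Int) => if (x - j - 1)
              + ((PySem.List.pyRange ((i : Int) + 1) ((kappa.length : Nat) : Int)).foldl
                  (fun s r => if PySem.List.pyGetD kappa r 0 > j then s + 1 else s) 0)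
              + 1 ≤ k then c + 1 else c)
            = (fun (c j : Int) => if (fun j => decide (x - j
                + (PySem.List.len (below.eraseIdx (PySem.List.bisectLeft below x))
                  - (PySem.List.bisectRight (below.eraseIdx (PySem.List.bisectLeft below x)) j : Int)) ≤ k)) j
                = true then c + 1 else c) := by
          funext c j
          rw [hleg j]
          simp only [decide_eq_true_eq]
          by_cases hQ : (x - j + (PySem.List.len (below.eraseIdx (PySem.List.bisectLeft below x))
              - (PySem.List.bisectRight (below.eraseIdx (PySem.List.bisectLeft below x)) j : Int)) ≤ k)
          · rw [if_pos ((hQiff j).mpr hQ), if_pos hQ]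
          · rw [if_neg (fun hcon => hQ ((hQiff j).mp hcon)), if_neg hQ]
        rw [hfun, PySem.List.foldl_count_if, zero_add]
        apply countP_pyRange_of_mono _ _ _ i1 i2
        · intro j hj0 hjr
          simp only [decide_eq_false_iff_not]
          exact i3 j hj0 hjr
        · intro j hjr hjx
          simp only [decide_eq_true_eq]
          exact hook_mono _ hsort' _ _ _ hjr (i4 (by omega))
      rw [hcnt, if_pos hxpos]
      by_cases hc : x - hookSearch (below.eraseIdx (PySem.List.bisectLeft below x)) k x
          (PySem.List.len (below.eraseIdx (PySem.List.bisectLeft below x))) 0 x > 0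
      · rw [if_pos hc, if_pos hc, hcast]
        apply ih (i + 1) _ _ hdrop' hsort' hperm'
        intro c hc2
        rcases List.mem_append.mp hc2 with h | h
        · exact hpos c h
        · rw [List.mem_singleton] at h; omega
      · rw [if_neg hc, if_neg hc, hcast]
        exact ih (i + 1) _ _ hdrop' hsort' hperm' hpos
    · -- x ≤ 0 : the row contributes nothing on either side
      rw [PySem.List.pyRange_one_eq_nil (by omega : (x : Int) ≤ 0)]
      simp only [List.foldl_nil]
      rw [if_neg (by omega : ¬ (0 : Int) > 0), if_neg hxpos, hcast]
      exact ih (i + 1) _ _ hdrop' hsort' hperm' hpos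

-- ===== VERDICT (by name: the statement is the Claim_ definition above) =====
set_option maxHeartbeats 1000000 in
theorem core_to_bounded_spec : Claim_equal_core_to_bounded := by
  intro kappa k _
  unfold Spec_core_to_bounded
  by_cases hemp : kappa = []
  · subst hemp; rfl
  · have hA : core_to_bounded kappa k = pyNormalize
        ((PySem.List.pyRange ((0 : Nat) : Int) ((kappa.length : Nat) : Int)).foldl (fun rows i =>
          let cnt : Int :=
            (PySem.List.pyRange 0 (PySem.List.pyGetD kappa i 0)).foldl
              (fun c j =>
                if (PySem.List.pyGetD kappa i 0 - j - 1)
                    + ((PySem.List.pyRange (i + 1) ((kappa.length : Nat) : Int)).foldl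
                        (fun s r => if PySem.List.pyGetD kappa r 0 > j then s + 1 else s) 0)
                    + 1 ≤ k then c + 1 else c) 0
          if cnt > 0 then rows ++ [cnt] else rows) []) := by
      rw [core_to_bounded, if_neg hemp]; rfl
    have hB : core_to_bounded_alt kappa k = PySem.List.sorted
        ((kappa.foldl (fun (st : List Int × List Int) x =>
            let below := st.1.eraseIdx (PySem.List.bisectLeft st.1 x)
            if x > 0 then
              let m : Int := PySem.List.len below
              let lo := hookSearch below k x m 0 x
              let cnt := x - lo
              if cnt > 0 then (below, st.2 ++ [cnt]) else (below, st.2)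
            else (below, st.2))
          (PySem.List.sorted kappa (fun x => x) false, ([] : List Int))).2) (fun x => x) true := rfl
    have hsort : (PySem.List.sorted kappa (fun x => x) false).Pairwise (· ≤ ·) := by
      simpa using PySem.List.sorted_pairwise kappa (fun x => x)
    have hperm : (PySem.List.sorted kappa (fun x => x) false).Perm kappa :=
      PySem.List.sorted_perm kappa (fun x => x) false
    have h := main_loop kappa k kappa 0 [] (PySem.List.sorted kappa (fun x => x) false)
      (by simp) hsort hperm (by simp)
    rw [hA, hB, pyNormalize]
    rw [show ((0 : Nat) : Int) = (0 : Int) by simp] at h ⊢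
    rw [h.1]
    congr 1
    rw [List.filter_eq_self]
    intro a ha
    simpa using h.2 a ha
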